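-- pv_equiv track=rewrite | github.com/yiyang920/BH_many_2_many | encode_route.py | station_arrange
-- ===== SOURCE A (Python) =====
-- def station_arrange(L, tau):
--     count = 1
--     foo = list()
--     for i, (cur, nex) in enumerate(zip(L[:-1], L[1:])):
--         if i == len(L) - 2:
--             if cur != nex:
--                 foo.append(
--                     (cur, count - tau[cur, nex] + 1 if count + 1 > tau[cur, nex] else 1)
--                 )
--                 foo.append((nex, 1) if cur != nex else (cur, 1))
--                 break
--             else:
--                 foo.append((cur, 1))
--                 break
--
--         if cur != nex:
--             foo.append(
--                 (cur, count - tau[cur, nex] + 1 if count + 1 > tau[cur, nex] else 1)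
--             )
--             count = 0
--
--         count += 1
--
--     ans = list()
--     for s, count in foo:
--         ans += [s] * int(count)
--     return ans
-- ===== SOURCE B (Python) =====
-- def station_arrange(L, tau):
--     # Two-pass decomposition: build the run-length encoding of L, then emit
--     # each non-final run via its transition offset tau, final run once.
--     if len(L) < 2:
--         return []
--     runs = []
--     for x in L:
--         if runs and runs[-1][0] == x:
--             runs[-1] = (x, runs[-1][1] + 1)
--         else:
--             runs.append((x, 1))
--     ans = []
--     for (v, k), (w, _) in zip(runs, runs[1:]):
--         t = tau[v, w]
--         ans += [v] * (k - t + 1 if k >= t else 1)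
--     ans.append(runs[-1][0])
--     return ans
-- ===== Notes on version B (the rewrite author's own statement) =====
-- stated objective: simpler
-- what changed: Replaces A's fused single-pass counter with break/last-index special-casing by a two-pass decomposition: first build the run-length encoding of L, then a plain pairwise pass over the runs emitting each non-final run via tau and the final run once.
import Mathlib
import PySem

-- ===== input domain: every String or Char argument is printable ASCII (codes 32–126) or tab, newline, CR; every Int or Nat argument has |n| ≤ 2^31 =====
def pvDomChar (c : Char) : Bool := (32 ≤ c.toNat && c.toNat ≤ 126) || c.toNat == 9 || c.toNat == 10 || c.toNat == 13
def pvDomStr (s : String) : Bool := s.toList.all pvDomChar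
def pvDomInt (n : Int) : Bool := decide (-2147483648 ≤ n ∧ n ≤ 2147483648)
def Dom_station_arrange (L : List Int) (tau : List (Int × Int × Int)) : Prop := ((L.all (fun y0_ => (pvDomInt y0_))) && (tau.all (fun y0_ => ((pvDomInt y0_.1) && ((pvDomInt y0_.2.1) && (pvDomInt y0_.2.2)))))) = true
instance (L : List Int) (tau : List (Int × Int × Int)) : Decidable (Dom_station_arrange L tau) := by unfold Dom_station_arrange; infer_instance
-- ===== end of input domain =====

-- B is a simpler two-pass decomposition (explicit run-length encoding, then a
-- pairwise pass over the runs) of A's fused single-pass counter loop; return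
-- values agree on Pre_ (where no KeyError occurs).

-- ===== PORT A =====
-- shared rendering of Python's `tau[a, b]` dict lookup (first match on the key
-- pair); the `.getD 0` default is only reached outside Pre_ (Python: KeyError)
def tauFind? (tau : List (Int × Int × Int)) (a b : Int) : Option Int :=
  (tau.find? (fun r => r.1 == a && r.2.1 == b)).map (fun r => r.2.2)

def tauGet (tau : List (Int × Int × Int)) (a b : Int) : Int :=
  (tauFind? tau a b).getD 0

-- the enumerate-loop over zip(L[:-1], L[1:]) with its `break`s, state = (i, count, foo)
def saLoop (L : List Int) (tau : List (Int × Int × Int)) :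
    Nat → Int → List (Int × Int) → List (Int × Int) → List (Int × Int)
  | _, _, foo, [] => foo
  | i, count, foo, (cur, nex) :: rest =>
    if i = L.length - 2 then
      if cur ≠ nex then
        (foo ++ [(cur, if count + 1 > tauGet tau cur nex
                       then count - tauGet tau cur nex + 1 else 1)])
          ++ [if cur ≠ nex then (nex, 1) else (cur, 1)]
      else
        foo ++ [(cur, 1)]
    else
      if cur ≠ nex then
        saLoop L tau (i + 1) (0 + 1)
          (foo ++ [(cur, if count + 1 > tauGet tau cur nex
                         then count - tauGet tau cur nex + 1 else 1)]) rest
      else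
        saLoop L tau (i + 1) (count + 1) foo rest

def station_arrange (L : List Int) (tau : List (Int × Int × Int)) : List Int :=
  let foo := saLoop L tau 0 1 [] (List.zip L.dropLast (L.drop 1))
  foo.foldl (fun ans sc => ans ++ List.replicate sc.2.toNat sc.1) []

-- ===== PORT B =====
-- run-length encoding: `runs[-1]` update / append rendered as a fold on the
-- reversed run list
def runStep (rs : List (Int × Int)) (x : Int) : List (Int × Int) :=
  match rs with
  | (v, k) :: tl => if v == x then (v, k + 1) :: tl else (x, 1) :: (v, k) :: tl
  | [] => [(x, 1)]

def runsOf (L : List Int) : List (Int × Int) := (L.foldl runStep []).reverse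

-- the zip(runs, runs[1:]) pass followed by appending the last run's value
def emitRuns (tau : List (Int × Int × Int)) : List (Int × Int) → List Int
  | [] => []
  | [(v, _)] => [v]
  | (v, k) :: (w, l) :: rest =>
    (List.replicate (if k ≥ tauGet tau v w
                     then k - tauGet tau v w + 1 else 1).toNat v)
      ++ emitRuns tau ((w, l) :: rest)

def station_arrange_alt (L : List Int) (tau : List (Int × Int × Int)) : List Int :=
  if L.length < 2 then [] else emitRuns tau (runsOf L)

-- ===== PRECONDITION & SPEC =====
-- Pre_ excludes inputs where some adjacent unequal pair of L is missing from
-- tau: there Python A (and B) raise KeyError instead of returning.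
def Pre_station_arrange (L : List Int) (tau : List (Int × Int × Int)) : Prop :=
  ∀ p ∈ List.zip L (L.drop 1), p.1 ≠ p.2 → (tauFind? tau p.1 p.2).isSome

instance (L : List Int) (tau : List (Int × Int × Int)) : Decidable (Pre_station_arrange L tau) := by
  unfold Pre_station_arrange; infer_instance

def pvWitness_station_arrange : List Int × (List (Int × Int × Int)) :=
  ([1, 1, 2, 3, 3, 3], [(1, 2, 2), (2, 3, 1)])

def Spec_station_arrange (L : List Int) (tau : List (Int × Int × Int)) (out : List Int) : Prop := out = station_arrange_alt L tau
instance (L : List Int) (tau : List (Int × Int × Int)) (out : List Int) : Decidable (Spec_station_arrange L tau out) := by unfold Spec_station_arrange; infer_instance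

-- ===== CLAIM (what is proved, stated in full; the proofs are below) =====
def Claim_equal_station_arrange : Prop := ∀ (L : List Int) (tau : List (Int × Int × Int)), Dom_station_arrange L tau → Pre_station_arrange L tau → Spec_station_arrange L tau (station_arrange L tau)

-- ===== LEMMAS AND PROOFS =====

-- reference function both sides are reduced to: count of the current run so
-- far in the first argument
def core (tau : List (Int × Int × Int)) : Int → List Int → List Int
  | _, [] => []
  | _, [x] => [x]
  | c, x :: y :: rest =>
    if x = y then core tau (c + 1) (y :: rest)
    else
      (List.replicate (if c + 1 > tauGet tau x y
                       then c - tauGet tau x y + 1 else 1).toNat x)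
        ++ core tau 1 (y :: rest)

def expandFoo (foo : List (Int × Int)) : List Int :=
  foo.flatMap (fun sc => List.replicate sc.2.toNat sc.1)

theorem zip_dropLast_drop (l : List Int) :
    List.zip l.dropLast (l.drop 1) = List.zip l (l.drop 1) := by
  induction l with
  | nil => simp
  | cons x xs ih =>
    cases xs with
    | nil => simp
    | cons y ys =>
      simp only [List.dropLast_cons₂, List.drop_one] at *
      simpa using ih

theorem saLoop_core (L : List Int) (tau : List (Int × Int × Int)) :
    ∀ s : List Int, 2 ≤ s.length →
    ∀ (i : Nat) (c : Int) (foo : List (Int × Int)),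
      i + s.length = L.length →
      expandFoo (saLoop L tau i c foo (List.zip s (s.drop 1))) =
        expandFoo foo ++ core tau c s := by
  intro s
  induction s with
  | nil => intro h; simp at h
  | cons x xs ih =>
    intro hlen i c foo hi
    cases xs with
    | nil => simp at hlen
    | cons y ys =>
      simp only [List.drop_one, List.tail_cons, List.zip_cons_cons]
      cases ys with
      | nil =>
        -- last pair: i = L.length - 2
        have hil : i = L.length - 2 := by simp at hi; omega
        simp only [saLoop, hil]
        rw [if_pos trivial]
        by_cases hxy : x = y
        · subst hxy
          simp [core, expandFoo]
        · simp [hxy, core, expandFoo]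
      | cons z zs =>
        have hil : i ≠ L.length - 2 := by simp at hi ⊢; omega
        simp only [saLoop, if_neg hil]
        by_cases hxy : x = y
        · subst hxy
          rw [if_neg (by simp)]
          have := ih (by simp) (i + 1) (c + 1) foo (by simp at hi ⊢; omega)
          simp only [List.drop_one, List.tail_cons] at this
          rw [this]
          simp [core]
        · rw [if_pos hxy]
          have := ih (by simp) (i + 1) ((0 : Int) + 1)
            (foo ++ [(x, if c + 1 > tauGet tau x y
                         then c - tauGet tau x y + 1 else 1)])
            (by simp at hi ⊢; omega)
          simp only [List.drop_one, List.tail_cons] at this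
          rw [this]
          simp [core, hxy, expandFoo]

-- the run-length fold equals a direct recursion
def runsGo (v : Int) (c : Int) : List Int → List (Int × Int)
  | [] => [(v, c)]
  | y :: ys => if v = y then runsGo v (c + 1) ys else (v, c) :: runsGo y 1 ys

theorem runs_fold_eq (xs : List Int) :
    ∀ (v c : Int) (tl : List (Int × Int)),
      (xs.foldl runStep ((v, c) :: tl)).reverse = tl.reverse ++ runsGo v c xs := by
  induction xs with
  | nil => intro v c tl; simp [runsGo]
  | cons x xs ih =>
    intro v c tl
    by_cases hvx : v = x
    · subst hvx
      simp only [List.foldl_cons, runStep, beq_self_eq_true]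
      rw [if_pos trivial, ih]
      simp [runsGo]
    · simp only [List.foldl_cons, runStep]
      rw [if_neg (by simpa using hvx), ih]
      simp [runsGo, hvx]

theorem runsGo_head (v c : Int) (xs : List Int) :
    ∃ c' tl, runsGo v c xs = (v, c') :: tl := by
  induction xs generalizing c with
  | nil => exact ⟨c, [], rfl⟩
  | cons y ys ih =>
    by_cases hvy : v = y
    · subst hvy
      obtain ⟨c', tl, h⟩ := ih (c + 1)
      exact ⟨c', tl, by simp [runsGo, h]⟩
    · exact ⟨c, runsGo y 1 ys, by simp [runsGo, hvy]⟩

theorem emit_runsGo (tau : List (Int × Int × Int)) (xs : List Int) :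
    ∀ (v c : Int), emitRuns tau (runsGo v c xs) = core tau c (v :: xs) := by
  induction xs with
  | nil => intro v c; simp [runsGo, emitRuns, core]
  | cons y ys ih =>
    intro v c
    by_cases hvy : v = y
    · subst hvy
      simp only [runsGo]
      rw [if_pos trivial, ih]
      simp [core]
    · simp only [runsGo, if_neg hvy]
      obtain ⟨c', tl, h⟩ := runsGo_head y 1 ys
      rw [h, emitRuns, ← h, ih]
      have hcond : (c ≥ tauGet tau v y) = (c + 1 > tauGet tau v y) := by
        simp only [eq_iff_iff, ge_iff_le, gt_iff_lt]; omega
      simp only [core, if_neg hvy, hcond]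

theorem saLoop_foo_base (L : List Int) (tau : List (Int × Int × Int))
    (i : Nat) (c : Int) (foo : List (Int × Int)) :
    saLoop L tau i c foo [] = foo := rfl

theorem expandFoo_eq_foldl (foo : List (Int × Int)) :
    foo.foldl (fun ans sc => ans ++ List.replicate sc.2.toNat sc.1) [] = expandFoo foo := by
  simpa [expandFoo] using
    PySem.List.foldl_append_eq_flatMap (fun sc : Int × Int => List.replicate sc.2.toNat sc.1) foo ([] : List Int)

-- ===== VERDICT (by name: the statement is the Claim_ definition above) =====
theorem station_arrange_spec : Claim_equal_station_arrange := by
  intro L tau _ _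
  unfold Spec_station_arrange station_arrange station_arrange_alt
  rw [expandFoo_eq_foldl, zip_dropLast_drop]
  by_cases hlen : L.length < 2
  · match L, hlen with
    | [], _ => simp [saLoop_foo_base, expandFoo]
    | [x], _ => simp [saLoop_foo_base, expandFoo]
  · rw [if_neg hlen]
    have h2 : 2 ≤ L.length := by omega
    rw [saLoop_core L tau L h2 0 1 [] (by simp)]
    match L, h2 with
    | x :: xs, _ =>
      have : runsOf (x :: xs) = runsGo x 1 xs := by
        simpa [runsOf, runStep] using runs_fold_eq xs x 1 []
      rw [this, emit_runsGo]
      simp [expandFoo]
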